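-- pv_equiv track=rewrite | github.com/parc-nsi/premiere-nsi-parc | chapitre7/correction/Images-Tableaux2d-Eleves-Partie1-Correction.py | damier
-- ===== SOURCE A (Python) =====
-- def matrice_vide(ncol, nlig, mode):
--     """Retourne une matrice de pixels de n lignes et m colonnes
--     représentant une image noire dans le mode  d'image choisi"""
--     assert mode in ['1', 'L', 'RGB'], "mode doit appartenir à ['1', 'L', 'RGB']"
--     if mode in ['1', 'L']:
--         return [[0 for x in range(ncol)] for y in range(nlig)]
--     else:
--         return [[[0,0,0] for x in range(ncol)] for y in range(nlig)]
--
-- def damier(nlig, ncol):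
--     """Retourne la matrice de pixels de l'image binaire d'un damier
--     ligne et colonne de même parité : blanc   sinon : noir
--     """
--     pix = matrice_vide(ncol, nlig, '1')
--     for x in range(ncol): #boucle sur les colonnes
--         for y in range(nlig): #boucle sur les lignes
--             if y % 2 == x % 2:
--                 pix[y][x] = 0
--             else:
--                 pix[y][x] = 1
--     return pix
-- ===== SOURCE B (Python) =====
-- def damier(nlig, ncol):
--     """Build the row templates once and replicate a fresh copy per row,
--     instead of testing the parity of every cell."""
--     even_row = [0 if x % 2 == 0 else 1 for x in range(ncol)]
--     odd_row = [1 - v for v in even_row]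
--     return [even_row[:] if y % 2 == 0 else odd_row[:] for y in range(nlig)]
-- ===== Notes on version B (the rewrite author's own statement) =====
-- stated objective: alternative
-- what changed: B computes the two repeating row patterns once and assembles the matrix by copying the right template per row, replacing A's zero-matrix allocation followed by a per-cell column-major parity rewrite.
import Mathlib
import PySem

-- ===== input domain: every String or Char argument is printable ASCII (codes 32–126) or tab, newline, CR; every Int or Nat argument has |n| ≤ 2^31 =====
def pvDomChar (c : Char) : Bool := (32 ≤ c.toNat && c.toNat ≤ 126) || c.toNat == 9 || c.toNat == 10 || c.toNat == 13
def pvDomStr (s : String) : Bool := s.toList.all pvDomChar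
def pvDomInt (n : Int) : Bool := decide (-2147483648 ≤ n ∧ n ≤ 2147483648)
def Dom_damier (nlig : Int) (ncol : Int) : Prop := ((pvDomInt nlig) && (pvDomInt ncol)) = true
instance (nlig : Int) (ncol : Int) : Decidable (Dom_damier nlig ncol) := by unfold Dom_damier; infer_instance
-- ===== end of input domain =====

-- B builds the two repeating row templates once and replicates them per row, instead of A's
-- per-cell parity rewrite of a pre-allocated zero matrix (alternative decomposition, same cost).


-- ===== PORT A =====
-- matrice_vide specialised to the '1' branch (damier's only call, mode = '1'; the RGB branch
-- returns a different element type and is unreachable here)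
def matriceVide1 (ncol : Int) (nlig : Int) : List (List Int) :=
  (PySem.List.pyRange 0 nlig 1).map (fun _ => (PySem.List.pyRange 0 ncol 1).map (fun _ => (0:Int)))

def damier (nlig : Int) (ncol : Int) : List (List Int) :=
  let pix := matriceVide1 ncol nlig
  (PySem.List.pyRange 0 ncol 1).foldl (fun pix x =>
    (PySem.List.pyRange 0 nlig 1).foldl (fun pix y =>
      PySem.List.pySetD pix y
        (PySem.List.pySetD (PySem.List.pyGetD pix y []) x
          (if PySem.Int.mod y 2 == PySem.Int.mod x 2 then (0:Int) else 1))) pix) pix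

-- ===== PORT B =====
def damier_alt (nlig : Int) (ncol : Int) : List (List Int) :=
  let evenRow := (PySem.List.pyRange 0 ncol 1).map (fun x => if PySem.Int.mod x 2 == 0 then (0:Int) else 1)
  let oddRow := evenRow.map (fun v => 1 - v)
  (PySem.List.pyRange 0 nlig 1).map (fun y => if PySem.Int.mod y 2 == 0 then evenRow else oddRow)

-- ===== PRECONDITION & SPEC =====
def Spec_damier (nlig : Int) (ncol : Int) (out : List (List Int)) : Prop := out = damier_alt nlig ncol
instance (nlig : Int) (ncol : Int) (out : List (List Int)) : Decidable (Spec_damier nlig ncol out) := by unfold Spec_damier; infer_instance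

-- ===== CLAIM (what is proved, stated in full; the proofs are below) =====
def Claim_equal_damier : Prop := ∀ (nlig : Int) (ncol : Int), Dom_damier nlig ncol → Spec_damier nlig ncol (damier nlig ncol)

-- ===== LEMMAS AND PROOFS =====
lemma pyRange_zero_int (n : Int) :
    PySem.List.pyRange 0 n 1 = (List.range n.toNat).map (fun (k : Nat) => (k:Int)) := by
  by_cases h : n ≤ 0
  · have h0 : n.toNat = 0 := by omega
    rw [h0]
    simp [PySem.List.pyRange]
    omega
  · conv_lhs => rw [show n = (n.toNat : Int) by omega]
    rw [PySem.List.pyRange_zero_natCast]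

lemma modcast (j : Nat) : PySem.Int.mod (j:Int) 2 = ((j % 2 : Nat) : Int) := by
  exact_mod_cast PySem.Int.mod_natCast j 2

-- a fold over range n that overwrites slot i with a value read from slot i rewrites the first n slots
lemma setfold {α : Type} (u : Nat → α → α) (d : α) :
    ∀ (n : Nat) (row : List α), n ≤ row.length →
    (List.range n).foldl (fun r i => r.set i (u i (r.getD i d))) row
      = (List.range n).map (fun i => u i (row.getD i d)) ++ row.drop n := by
  intro n
  induction n with
  | zero => simp
  | succ m ih =>
    intro row hlen
    rw [List.range_succ, List.foldl_append, ih row (by omega)]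
    simp only [List.foldl_cons, List.foldl_nil]
    have hm : m < row.length := by omega
    have hget : ((List.range m).map (fun i => u i (row.getD i d)) ++ row.drop m).getD m d
        = row.getD m d := by
      rw [List.getD_append_right _ _ _ _ (by simp)]
      simp [List.getD, List.getElem?_drop]
    rw [hget]
    have hset : ((List.range m).map (fun i => u i (row.getD i d)) ++ row.drop m).set m (u m (row.getD m d))
        = (List.range m).map (fun i => u i (row.getD i d)) ++ (row.drop m).set 0 (u m (row.getD m d)) := by
      rw [List.set_append_right _ _ (by simp)]
      simp
    rw [hset]
    have hdrop : row.drop m = row.getD m d :: row.drop (m+1) := by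
      rw [List.getD, List.drop_eq_getElem_cons hm]
      simp [List.getElem?_eq_getElem hm]
    rw [hdrop]
    simp

-- A's column-major loop nest, expressed on Nat ranges, equals the row-wise map of per-row folds
lemma outerfold (g : Nat → Nat → Int) (N : Nat) (r0 : List Int) :
    ∀ (m : Nat),
    (List.range m).foldl
        (fun pix k => (List.range N).foldl
          (fun pix j => pix.set j ((pix.getD j []).set k (g j k))) pix)
        ((List.range N).map (fun _ => r0))
      = (List.range N).map (fun j => (List.range m).foldl (fun r k => r.set k (g j k)) r0) := by
  intro m
  induction m with
  | zero => simp
  | succ m ih =>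
    rw [List.range_succ, List.foldl_append, ih]
    simp only [List.foldl_cons, List.foldl_nil]
    rw [setfold (fun j r => r.set m (g j m)) [] N _ (by simp)]
    have hd : ((List.range N).map (fun j => (List.range m).foldl (fun r k => r.set k (g j k)) r0)).drop N = [] := by
      simp
    rw [hd, List.append_nil]
    apply List.map_congr_left
    intro j hj
    have hjN := List.mem_range.mp hj
    conv_rhs => rw [List.foldl_append]
    simp only [List.foldl_cons, List.foldl_nil]
    congr 1
    simp [List.getD, List.getElem?_map, List.getElem?_range hjN]

lemma damier_eq (nlig ncol : Int) : damier nlig ncol = damier_alt nlig ncol := by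
  simp only [damier, damier_alt, matriceVide1, pyRange_zero_int, List.foldl_map,
    List.map_map, PySem.List.pySetD_natCast, PySem.List.pyGetD_natCast]
  simp only [Function.comp_def]
  rw [outerfold (fun j k => if (PySem.Int.mod (j:Int) 2 == PySem.Int.mod (k:Int) 2) then (0:Int) else 1)
      nlig.toNat ((List.range ncol.toNat).map (fun _ => (0:Int))) ncol.toNat]
  apply List.map_congr_left
  intro j hj
  rw [setfold (fun k _ => if (PySem.Int.mod (j:Int) 2 == PySem.Int.mod (k:Int) 2) then (0:Int) else 1) 0
      ncol.toNat _ (by simp)]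
  have hdrop : List.drop ncol.toNat ((List.range ncol.toNat).map (fun _ => (0:Int))) = [] := by simp
  rw [hdrop, List.append_nil]
  rcases Nat.mod_two_eq_zero_or_one j with hjp | hjp <;>
    simp only [modcast, hjp, Nat.cast_zero, Nat.cast_one] <;>
    simp only [show (((0:Int) == 0) = true) = True by simp, show (((1:Int) == 0) = true) = False by simp,
      if_true, if_false] <;>
    (apply List.map_congr_left; intro k _;
     rcases Nat.mod_two_eq_zero_or_one k with hkp | hkp <;> simp [hkp])

-- ===== VERDICT (by name: the statement is the Claim_ definition above) =====
theorem damier_spec : Claim_equal_damier := by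
  intro nlig ncol _
  unfold Spec_damier
  exact damier_eq nlig ncol
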